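-- pv_equiv track=rewrite | github.com/ciw-administrate/sudoku_solver | app/sudoku_solver.py | sort_row
-- ===== SOURCE A (Python) =====
-- from typing import List
--
-- def sort_row(solution: List[List[int]], row_number: int) -> List[int]:
--     row: List[int] = solution[row_number].copy()
--     sorted_row: List[int] = []
--     for number in range(1, 10):
--         if number in row:
--             number_index = row.index(number)
--             temp_num = row.pop(number_index)
--             sorted_row.append(temp_num)
--     return sorted_row
-- ===== SOURCE B (Python) =====
-- from typing import List
--
-- def sort_row(solution: List[List[int]], row_number: int) -> List[int]:
--     return sorted(set(solution[row_number]) & set(range(1, 10)))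
-- ===== Notes on version B (the rewrite author's own statement) =====
-- stated objective: simpler
-- what changed: Replaced the domain scan over 1..9 with membership tests, list.index and list.pop on a copied row by a one-line set intersection followed by sorted(); no working copy is mutated and no per-number linear scans remain.
import Mathlib
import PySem

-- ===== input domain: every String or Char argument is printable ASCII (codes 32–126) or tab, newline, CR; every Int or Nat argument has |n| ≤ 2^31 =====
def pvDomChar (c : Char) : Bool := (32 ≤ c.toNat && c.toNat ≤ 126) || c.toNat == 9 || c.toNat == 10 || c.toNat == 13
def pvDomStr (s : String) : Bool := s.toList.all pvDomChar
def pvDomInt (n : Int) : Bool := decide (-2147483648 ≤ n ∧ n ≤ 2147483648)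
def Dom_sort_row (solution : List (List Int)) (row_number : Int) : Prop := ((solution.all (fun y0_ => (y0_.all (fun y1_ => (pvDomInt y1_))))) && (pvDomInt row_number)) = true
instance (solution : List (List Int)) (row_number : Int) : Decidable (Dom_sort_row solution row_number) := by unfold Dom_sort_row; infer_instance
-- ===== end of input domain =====

-- B replaces A's scan of the domain 1..9 with in/index/pop on a mutated copy by a
-- one-line set intersection followed by sorted() — simpler, and no working copy is mutated.

-- ===== PORT A =====
-- literal transliteration: copy the row, loop number in range(1,10); if number in row:
-- index, pop, append; state = (row, sorted_row)
def sort_row (solution : List (List Int)) (row_number : Int) : List Int :=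
  match PySem.List.pyGet? solution row_number with
  | none => []  -- IndexError in Python; excluded by Pre_sort_row
  | some row0 =>
    ((PySem.List.pyRange 1 10 1).foldl (fun (s : List Int × List Int) number =>
      if number ∈ s.1 then
        match PySem.List.index? s.1 number with
        | none => s  -- unreachable: number ∈ s.1
        | some number_index =>
          match PySem.List.pop? s.1 (number_index : Int) with
          | none => s  -- unreachable: index in range
          | some (temp_num, rest) => (rest, s.2 ++ [temp_num])
      else s) (row0, [])).2

-- ===== PORT B =====
-- literal transliteration of Source B: sorted(set(solution[row_number]) & set(range(1, 10)))
def sort_row_alt (solution : List (List Int)) (row_number : Int) : List Int :=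
  match PySem.List.pyGet? solution row_number with
  | none => []  -- IndexError in Python; excluded by Pre_sort_row
  | some row0 =>
    PySem.List.sorted
      (PySem.Set.inter (PySem.Set.ofList row0) (PySem.Set.ofList (PySem.List.pyRange 1 10 1)))
      (fun x => x) false

-- ===== PRECONDITION & SPEC =====
-- A raises IndexError iff row_number is out of range for solution; nothing else raises.
def Pre_sort_row (solution : List (List Int)) (row_number : Int) : Prop :=
  PySem.Raise.InRange solution.length row_number
instance (solution : List (List Int)) (row_number : Int) : Decidable (Pre_sort_row solution row_number) := by unfold Pre_sort_row; infer_instance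
def pvWitness_sort_row : List (List Int) × Int := ([[3, 1, 4, 1, 9]], 0)

def Spec_sort_row (solution : List (List Int)) (row_number : Int) (out : List Int) : Prop := out = sort_row_alt solution row_number
instance (solution : List (List Int)) (row_number : Int) (out : List Int) : Decidable (Spec_sort_row solution row_number out) := by unfold Spec_sort_row; infer_instance

-- ===== CLAIM (what is proved, stated in full; the proofs are below) =====
def Claim_equal_sort_row : Prop := ∀ (solution : List (List Int)) (row_number : Int), Dom_sort_row solution row_number → Pre_sort_row solution row_number → Spec_sort_row solution row_number (sort_row solution row_number)

-- ===== LEMMAS AND PROOFS =====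

-- abbreviation for A's loop body (proof-side only)
def pvStepA (s : List Int × List Int) (number : Int) : List Int × List Int :=
  if number ∈ s.1 then
    match PySem.List.index? s.1 number with
    | none => s
    | some number_index =>
      match PySem.List.pop? s.1 (number_index : Int) with
      | none => s
      | some (temp_num, rest) => (rest, s.2 ++ [temp_num])
  else s

theorem pvEraseIdx_append (pre suf : List Int) (n : Int) :
    (pre ++ n :: suf).eraseIdx pre.length = pre ++ suf := by
  induction pre with
  | nil => simp
  | cons p ps ihp => simpa using ihp

theorem pvStepA_mem {r acc : List Int} {n : Int} (h : n ∈ r) :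
    pvStepA (r, acc) n = (r.erase n, acc ++ [n]) := by
  obtain ⟨k, hk⟩ := Option.isSome_iff_exists.mp ((PySem.List.index?_isSome_iff r n).mpr h)
  obtain ⟨pre, suf, hre, hlen, hnp⟩ := (PySem.List.index?_eq_some_iff r n k).mp hk
  subst hre hlen
  have hlt : pre.length < (pre ++ n :: suf).length := by simp
  have hpop := PySem.List.pop?_natCast (xs := pre ++ n :: suf) pre.length hlt
  have hget : (pre ++ n :: suf)[pre.length] = n := by simp
  have herz := pvEraseIdx_append pre suf n
  have hero : (pre ++ n :: suf).erase n = pre ++ suf := by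
    rw [List.erase_append_right _ hnp, List.erase_cons_head n suf]
  simp only [pvStepA, h, if_pos, hk, hpop, hget, herz, hero]

theorem pvStepA_not_mem {r acc : List Int} {n : Int} (h : n ∉ r) :
    pvStepA (r, acc) n = (r, acc) := by
  simp [pvStepA, h]

theorem pvLoopA (ns : List Int) (r acc : List Int) (hnd : ns.Nodup) :
    (ns.foldl pvStepA (r, acc)).2 = acc ++ ns.filter (fun n => decide (n ∈ r)) := by
  induction ns generalizing r acc with
  | nil => simp
  | cons n ns ih =>
    obtain ⟨hn, hnd'⟩ := List.nodup_cons.mp hnd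
    by_cases hm : n ∈ r
    · rw [List.foldl_cons, pvStepA_mem hm, ih _ _ hnd']
      have hfe : ns.filter (fun m => decide (m ∈ r.erase n)) = ns.filter (fun m => decide (m ∈ r)) := by
        apply List.filter_congr
        intro m hmns
        have hne : m ≠ n := fun e => hn (e ▸ hmns)
        simp [List.mem_erase_of_ne hne]
      simp [hm, hfe]
    · rw [List.foldl_cons, pvStepA_not_mem hm, ih _ _ hnd']
      simp [hm]

theorem pvRange_eq : PySem.List.pyRange 1 10 1 = [1, 2, 3, 4, 5, 6, 7, 8, 9] := by decide

theorem pvSorted_inter (r : List Int) :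
    PySem.List.sorted
      (PySem.Set.inter (PySem.Set.ofList r) (PySem.Set.ofList (PySem.List.pyRange 1 10 1)))
      (fun x => x) false
    = (PySem.List.pyRange 1 10 1).filter (fun n => decide (n ∈ r)) := by
  apply PySem.List.sorted_eq_of_perm_of_pairwise_lt
  · apply (List.perm_ext_iff_of_nodup ?_ ?_).mpr
    · intro x
      simp [List.mem_filter, PySem.Set.mem_inter, PySem.Set.mem_ofList, and_comm]
    · exact List.Nodup.filter _ (by rw [pvRange_eq]; decide)
    · exact PySem.Set.nodup_inter _ _ (PySem.Set.nodup_ofList r)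
  · exact List.Pairwise.filter _ (by rw [pvRange_eq]; decide)

-- ===== VERDICT (by name: the statement is the Claim_ definition above) =====
theorem sort_row_spec : Claim_equal_sort_row := by
  intro solution row_number _ hpre
  unfold Pre_sort_row at hpre
  unfold Spec_sort_row sort_row sort_row_alt
  cases hrow : PySem.List.pyGet? solution row_number with
  | none => exact absurd hpre ((PySem.List.pyGet?_eq_none_iff solution row_number).mp hrow)
  | some row0 =>
    dsimp only
    have hloop := pvLoopA (PySem.List.pyRange 1 10 1) row0 [] (by rw [pvRange_eq]; decide)
    rw [pvSorted_inter]
    simpa [pvStepA] using hloop
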